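-- pv_equiv track=rewrite | github.com/asklasek/FS3100-Formatter | OIFormatter1.0.py | addSamples
-- ===== SOURCE A (Python) =====
-- def addSamples(runList, sampleList, test, rowNum, wgNum, injections, cupNum):
--     for item in sampleList:
--         strRowNumber, rowNum=rowConverter(rowNum) # Increase and format the row number.
--         strCupNum=str(cupNum)   # Format and increase the cup number.
--         cupNum+=1
--         injections+=1
--         if injections>10: # Insert a CCV/CCB bracketing pair every 10 injections.
--             injections=1  # Reset injections to 1
--             if test=="test1": # Ammonia Bracket
--                 bracketList=["102`CCV`U`1`1`1`0`","0`CCB`U`1`1`1`0`","0`Read Baseline`RB`1`1`1`0`"]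
--                 for QC in bracketList:
--                     runList.append(strRowNumber+QC)
--                     strRowNumber, rowNum=rowConverter(rowNum)
--             else:
--                 bracketList=["107`CCV-NO3`U`1`1`1`0`","108`CCV-NO2`U`1`1`1`0`","0`CCB`U`1`1`1`0`","0`Read Baseline`RB`1`1`1`0`"]
--                 for QC in bracketList:
--                     runList.append(strRowNumber+QC)
--                     strRowNumber, rowNum=rowConverter(rowNum)
--         line=strRowNumber+strCupNum+"`"+item+"`U`1`1`1`0`" # Line format for Omnion csv format.
--         runList.append(line)
--     #strRowNumber, rowNum=rowConverter(rowNum)  # Add a closing bracket of CCV/CCB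
--     if test=="test1": # Ammonia Bracket
--         bracketList=["102`CCV`U`1`1`1`0`","0`CCB`U`1`1`1`0`","0`Read Baseline`RB`1`1`1`0`"]
--         for QC in bracketList:
--             strRowNumber, rowNum=rowConverter(rowNum)
--             runList.append(strRowNumber+QC)
--     else:
--         bracketList=["107`CCV-NO3`U`1`1`1`0`","108`CCV-NO2`U`1`1`1`0`","0`CCB`U`1`1`1`0`","0`Read Baseline`RB`1`1`1`0`"]
--         for QC in bracketList:
--             strRowNumber, rowNum=rowConverter(rowNum)
--             runList.append(strRowNumber+QC)
--     return runList, rowNum, cupNum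
--
-- def rowConverter(rowNum):
--     rowNum+=1
--     if rowNum<10:    # Single Digit row.
--         strRowNum="Row_00"+str(rowNum)+"="
--     elif rowNum<100: # Double Digit row.
--         strRowNum="Row_0"+str(rowNum)+"="
--     else:          # Triple Digit row.
--         strRowNum="Row_"+str(rowNum)+"="
--     return strRowNum, rowNum
-- ===== SOURCE B (Python) =====
-- def rowLabel(n):
--     if n < 10:
--         return "Row_00" + str(n) + "="
--     elif n < 100:
--         return "Row_0" + str(n) + "="
--     else:
--         return "Row_" + str(n) + "="
--
-- def addSamples(runList, sampleList, test, rowNum, wgNum, injections, cupNum):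
--     if test == "test1":
--         bracket = ["102`CCV`U`1`1`1`0`", "0`CCB`U`1`1`1`0`", "0`Read Baseline`RB`1`1`1`0`"]
--     else:
--         bracket = ["107`CCV-NO3`U`1`1`1`0`", "108`CCV-NO2`U`1`1`1`0`",
--                    "0`CCB`U`1`1`1`0`", "0`Read Baseline`RB`1`1`1`0`"]
--     # Pass 1: build the run contents (no row prefixes yet).
--     contents = []
--     for item in sampleList:
--         injections += 1
--         if injections > 10:
--             injections = 1
--             contents.extend(bracket)
--         contents.append(str(cupNum) + "`" + item + "`U`1`1`1`0`")
--         cupNum += 1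
--     contents.extend(bracket)
--     # Pass 2: rows increment by exactly one per line, so prefix successive labels.
--     runList.extend(rowLabel(rowNum + i + 1) + c for i, c in enumerate(contents))
--     return runList, rowNum + len(contents), cupNum
-- ===== Notes on version B (the rewrite author's own statement) =====
-- stated objective: simpler
-- what changed: B replaces A's interleaved row numbering and three duplicated bracket-emitting loops by two passes: pass one builds the un-prefixed contents (periodic QC brackets plus sample entries, choosing the bracket list once), and pass two prefixes consecutive row labels via enumerate, computing the final rowNum as rowNum + len(contents).
import Mathlib
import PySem

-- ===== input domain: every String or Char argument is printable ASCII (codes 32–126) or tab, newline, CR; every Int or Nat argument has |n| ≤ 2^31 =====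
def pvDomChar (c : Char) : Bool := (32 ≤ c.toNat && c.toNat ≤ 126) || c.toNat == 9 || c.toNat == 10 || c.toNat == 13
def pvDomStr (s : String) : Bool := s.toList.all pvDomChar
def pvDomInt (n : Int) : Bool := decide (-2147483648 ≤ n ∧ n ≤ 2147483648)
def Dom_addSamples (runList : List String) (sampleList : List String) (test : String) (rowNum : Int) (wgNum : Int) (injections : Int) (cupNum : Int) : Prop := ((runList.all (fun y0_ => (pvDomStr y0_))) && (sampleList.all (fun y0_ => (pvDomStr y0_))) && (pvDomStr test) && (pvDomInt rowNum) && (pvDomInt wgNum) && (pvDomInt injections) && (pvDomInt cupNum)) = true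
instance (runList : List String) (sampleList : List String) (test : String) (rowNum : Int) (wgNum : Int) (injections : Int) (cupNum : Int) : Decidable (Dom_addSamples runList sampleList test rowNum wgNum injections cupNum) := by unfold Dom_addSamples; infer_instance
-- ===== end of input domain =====

-- B replaces A's interleaved row numbering and duplicated bracket blocks by two passes:
-- build the bracket/sample contents first, then prefix consecutive row labels (objective: simpler).
-- Both Pythons mutate runList in place (extend); the equivalence here is about the returned value.

-- ===== PORT A =====
def rowConverter (rowNum : Int) : String × Int :=
  let rowNum := rowNum + 1
  if rowNum < 10 then ("Row_00" ++ PySem.Int.toStr rowNum ++ "=", rowNum)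
  else if rowNum < 100 then ("Row_0" ++ PySem.Int.toStr rowNum ++ "=", rowNum)
  else ("Row_" ++ PySem.Int.toStr rowNum ++ "=", rowNum)

-- the inner 'for QC in bracketList' loop inside the sample loop (append, then advance the row)
def qcLoopA (runList : List String) (strRowNumber : String) (rowNum : Int) : List String → List String × String × Int
  | [] => (runList, strRowNumber, rowNum)
  | qc :: rest =>
    let runList := runList ++ [strRowNumber ++ qc]
    let p := rowConverter rowNum
    qcLoopA runList p.1 p.2 rest

-- the closing 'for QC in bracketList' loop (advance the row, then append)
def closeLoopA (runList : List String) (rowNum : Int) : List String → List String × Int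
  | [] => (runList, rowNum)
  | qc :: rest =>
    let p := rowConverter rowNum
    closeLoopA (runList ++ [p.1 ++ qc]) p.2 rest

-- the 'for item in sampleList' loop; state (runList, rowNum, injections, cupNum)
def mainLoopA (test : String) (runList : List String) (rowNum injections cupNum : Int) : List String → List String × Int × Int × Int
  | [] => (runList, rowNum, injections, cupNum)
  | item :: rest =>
    let p := rowConverter rowNum
    let strRowNumber := p.1
    let rowNum := p.2
    let strCupNum := PySem.Int.toStr cupNum
    let cupNum := cupNum + 1
    let injections := injections + 1
    let st :=
      if injections > 10 then
        let bracketList :=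
          if test == "test1" then
            ["102`CCV`U`1`1`1`0`", "0`CCB`U`1`1`1`0`", "0`Read Baseline`RB`1`1`1`0`"]
          else
            ["107`CCV-NO3`U`1`1`1`0`", "108`CCV-NO2`U`1`1`1`0`", "0`CCB`U`1`1`1`0`", "0`Read Baseline`RB`1`1`1`0`"]
        let q := qcLoopA runList strRowNumber rowNum bracketList
        (q.1, q.2.1, q.2.2, (1 : Int))
      else (runList, strRowNumber, rowNum, injections)
    let line := st.2.1 ++ strCupNum ++ "`" ++ item ++ "`U`1`1`1`0`"
    mainLoopA test (st.1 ++ [line]) st.2.2.1 st.2.2.2 cupNum rest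

def addSamples (runList : List String) (sampleList : List String) (test : String) (rowNum : Int) (wgNum : Int) (injections : Int) (cupNum : Int) : List String × Int × Int :=
  let m := mainLoopA test runList rowNum injections cupNum sampleList
  let bracketList :=
    if test == "test1" then
      ["102`CCV`U`1`1`1`0`", "0`CCB`U`1`1`1`0`", "0`Read Baseline`RB`1`1`1`0`"]
    else
      ["107`CCV-NO3`U`1`1`1`0`", "108`CCV-NO2`U`1`1`1`0`", "0`CCB`U`1`1`1`0`", "0`Read Baseline`RB`1`1`1`0`"]
  let c := closeLoopA m.1 m.2.1 bracketList
  (c.1, c.2, m.2.2.2)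

-- ===== PORT B =====
def rowLabel (n : Int) : String :=
  if n < 10 then "Row_00" ++ PySem.Int.toStr n ++ "="
  else if n < 100 then "Row_0" ++ PySem.Int.toStr n ++ "="
  else "Row_" ++ PySem.Int.toStr n ++ "="

-- pass 1 of Source B: loop over sampleList with state (injections, cupNum), building the
-- contents of the run (no row prefixes); returns (contents, injections, cupNum)
def contentsB (bracket : List String) (injections cupNum : Int) : List String → List String × Int × Int
  | [] => ([], injections, cupNum)
  | item :: rest =>
    let injections := injections + 1
    let pre := if injections > 10 then (bracket, (1 : Int)) else (([] : List String), injections)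
    let entry := PySem.Int.toStr cupNum ++ "`" ++ item ++ "`U`1`1`1`0`"
    let r := contentsB bracket pre.2 (cupNum + 1) rest
    (pre.1 ++ entry :: r.1, r.2)

def addSamples_alt (runList : List String) (sampleList : List String) (test : String) (rowNum : Int) (wgNum : Int) (injections : Int) (cupNum : Int) : List String × Int × Int :=
  let bracket :=
    if test == "test1" then
      ["102`CCV`U`1`1`1`0`", "0`CCB`U`1`1`1`0`", "0`Read Baseline`RB`1`1`1`0`"]
    else
      ["107`CCV-NO3`U`1`1`1`0`", "108`CCV-NO2`U`1`1`1`0`", "0`CCB`U`1`1`1`0`", "0`Read Baseline`RB`1`1`1`0`"]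
  let c := contentsB bracket injections cupNum sampleList
  let contents := c.1 ++ bracket
  -- pass 2 of Source B: prefix consecutive row labels
  (runList ++ (PySem.List.enumerate contents).map (fun p => rowLabel (rowNum + p.1 + 1) ++ p.2),
   rowNum + contents.length, c.2.2)

-- ===== PRECONDITION & SPEC =====
def Spec_addSamples (runList : List String) (sampleList : List String) (test : String) (rowNum : Int) (wgNum : Int) (injections : Int) (cupNum : Int) (out : List String × Int × Int) : Prop := out = addSamples_alt runList sampleList test rowNum wgNum injections cupNum
instance (runList : List String) (sampleList : List String) (test : String) (rowNum : Int) (wgNum : Int) (injections : Int) (cupNum : Int) (out : List String × Int × Int) : Decidable (Spec_addSamples runList sampleList test rowNum wgNum injections cupNum out) := by unfold Spec_addSamples; infer_instance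

-- ===== CLAIM (what is proved, stated in full; the proofs are below) =====
def Claim_equal_addSamples : Prop := ∀ (runList : List String) (sampleList : List String) (test : String) (rowNum : Int) (wgNum : Int) (injections : Int) (cupNum : Int), Dom_addSamples runList sampleList test rowNum wgNum injections cupNum → Spec_addSamples runList sampleList test rowNum wgNum injections cupNum (addSamples runList sampleList test rowNum wgNum injections cupNum)

-- ===== LEMMAS AND PROOFS =====

-- reference labelling: prefix each content with successive row labels starting at n+1
def labelFrom (n : Int) : List String → List String
  | [] => []
  | c :: rest => (rowLabel (n + 1) ++ c) :: labelFrom (n + 1) rest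

theorem rowConverter_eq (n : Int) : rowConverter n = (rowLabel (n + 1), n + 1) := by
  simp only [rowConverter, rowLabel]
  split_ifs <;> rfl

theorem labelFrom_append (a b : List String) (n : Int) :
    labelFrom n (a ++ b) = labelFrom n a ++ labelFrom (n + a.length) b := by
  induction a generalizing n with
  | nil => simp [labelFrom]
  | cons x xs ih =>
    simp only [List.cons_append, labelFrom, ih, List.length_cons]
    push_cast
    ring_nf

theorem qcLoopA_eq (l : List String) (rl : List String) (n : Int) :
    qcLoopA rl (rowLabel (n + 1)) (n + 1) l =
      (rl ++ labelFrom n l, rowLabel (n + l.length + 1), n + l.length + 1) := by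
  induction l generalizing rl n with
  | nil => simp [qcLoopA, labelFrom]
  | cons x xs ih =>
    simp only [qcLoopA, rowConverter_eq, labelFrom]
    rw [ih (rl ++ [rowLabel (n + 1) ++ x]) (n + 1)]
    simp only [List.append_assoc, List.singleton_append, List.length_cons, Prod.mk.injEq]
    push_cast
    and_intros <;> first | rfl | trivial | ring_nf

theorem closeLoopA_eq (l : List String) (rl : List String) (n : Int) :
    closeLoopA rl n l = (rl ++ labelFrom n l, n + l.length) := by
  induction l generalizing rl n with
  | nil => simp [closeLoopA, labelFrom]
  | cons x xs ih =>
    simp only [closeLoopA, rowConverter_eq, labelFrom]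
    rw [ih]
    simp only [List.append_assoc, List.singleton_append, List.length_cons, Prod.mk.injEq]
    push_cast
    and_intros <;> first | rfl | trivial | ring_nf

theorem enumMap_eq_labelFrom (l : List String) (n : Int) : ∀ s : Int,
    (PySem.List.enumerate l s).map (fun p => rowLabel (n + p.1 + 1) ++ p.2) = labelFrom (n + s) l := by
  induction l with
  | nil => intro s; simp [PySem.List.enumerate_nil, labelFrom]
  | cons x xs ih =>
    intro s
    simp only [PySem.List.enumerate_cons, List.map_cons, labelFrom, ih (s + 1)]
    ring_nf

theorem mainLoopA_eq (test : String) (bracket : List String)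
    (hb : bracket = (if test == "test1" then
        ["102`CCV`U`1`1`1`0`", "0`CCB`U`1`1`1`0`", "0`Read Baseline`RB`1`1`1`0`"]
      else
        ["107`CCV-NO3`U`1`1`1`0`", "108`CCV-NO2`U`1`1`1`0`", "0`CCB`U`1`1`1`0`", "0`Read Baseline`RB`1`1`1`0`"]))
    (l : List String) : ∀ (rl : List String) (n inj cup : Int),
    mainLoopA test rl n inj cup l =
      (rl ++ labelFrom n (contentsB bracket inj cup l).1,
       n + ((contentsB bracket inj cup l).1.length : Int),
       (contentsB bracket inj cup l).2.1, (contentsB bracket inj cup l).2.2) := by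
  induction l with
  | nil => intro rl n inj cup; simp [mainLoopA, contentsB, labelFrom]
  | cons item rest ih =>
    intro rl n inj cup
    simp only [mainLoopA, contentsB, rowConverter_eq, ← hb]
    by_cases h : inj + 1 > 10
    · simp only [if_pos h]
      rw [qcLoopA_eq]
      rw [ih]
      simp only [List.append_assoc, List.singleton_append, labelFrom_append, labelFrom,
        List.length_append, List.length_cons, Prod.mk.injEq]
      push_cast
      and_intros <;> first | rfl | trivial | (simp only [String.append_assoc]) | ring_nf
    · simp only [if_neg h]
      rw [ih]
      simp only [List.append_assoc, List.singleton_append, labelFrom, List.nil_append,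
        List.length_cons, Prod.mk.injEq]
      push_cast
      and_intros <;> first | rfl | trivial | (simp only [String.append_assoc]) | ring_nf

-- ===== VERDICT (by name: the statement is the Claim_ definition above) =====
theorem addSamples_spec : Claim_equal_addSamples := by
  intro runList sampleList test rowNum wgNum injections cupNum _
  unfold Spec_addSamples addSamples addSamples_alt
  simp only [mainLoopA_eq test (if test == "test1" then
      ["102`CCV`U`1`1`1`0`", "0`CCB`U`1`1`1`0`", "0`Read Baseline`RB`1`1`1`0`"]
    else
      ["107`CCV-NO3`U`1`1`1`0`", "108`CCV-NO2`U`1`1`1`0`", "0`CCB`U`1`1`1`0`", "0`Read Baseline`RB`1`1`1`0`"]) rfl,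
    closeLoopA_eq, enumMap_eq_labelFrom, labelFrom_append, List.append_assoc,
    List.length_append, Prod.mk.injEq, add_zero]
  push_cast
  and_intros <;> first | rfl | trivial | ring
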